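-- pv_equiv track=rewrite | github.com/LiuWoodsCode/webengine | renderer/css.py | _tokenize_selector
-- ===== SOURCE A (Python) =====
-- def _is_ident_char(ch: str) -> bool:
--     return ch.isalnum() or ch in ("-", "_", "*")
--
-- def _parse_string(s: str, start: int) -> tuple[str | None, int]:
--     quote = s[start]
--     i = start + 1
--     out = []
--     while i < len(s):
--         ch = s[i]
--         if ch == "\\" and i + 1 < len(s):
--             out.append(s[i + 1])
--             i += 2
--             continue
--         if ch == quote:
--             return "".join(out), i + 1
--         out.append(ch)
--         i += 1
--     return None, i
--
-- def _tokenize_selector(selector: str) -> list[tuple[str, str]]: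
--     tokens: list[tuple[str, str]] = []
--     i = 0
--     while i < len(selector):
--         ch = selector[i]
--         if ch.isspace():
--             while i < len(selector) and selector[i].isspace():
--                 i += 1
--             tokens.append(("WS", " "))
--             continue
--         if selector.startswith("::", i):
--             tokens.append(("DOUBLE_COLON", "::"))
--             i += 2
--             continue
--         if ch in (":", ".", "#", ",", ">", "*", "[", "]", "=", "(", ")", "+"):
--             tokens.append((ch, ch))
--             i += 1
--             continue
--         if ch in ("'", '"'):
--             s, j = _parse_string(selector, i)
--             if s is None:
--                 tokens.append(("ERROR", ""))
--                 return tokens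
--             tokens.append(("STRING", s))
--             i = j
--             continue
--         if _is_ident_char(ch):
--             j = i + 1
--             while j < len(selector) and _is_ident_char(selector[j]):
--                 j += 1
--             tokens.append(("IDENT", selector[i:j]))
--             i = j
--             continue
--         tokens.append(("ERROR", ch))
--         return tokens
--     return tokens
-- ===== SOURCE B (Python) =====
-- import re
--
-- # One master pattern: ordered alternatives, matched at the cursor position.
-- _MASTER = re.compile(r"\s+|::|[:.#,>*\[\]=()+]|['\"]|[\w\-*]+")
-- _PUNCT = ":.#,>*[]=()+"
--
--
-- def _scan_string(s, start):
--     quote = s[start]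
--     out = []
--     i = start + 1
--     n = len(s)
--     while i < n:
--         ch = s[i]
--         if ch == quote:
--             return "".join(out), i + 1
--         if ch == "\\" and i + 1 < n:
--             out.append(s[i + 1])
--             i += 2
--         else:
--             out.append(ch)
--             i += 1
--     return None, i
--
--
-- def _tokenize_selector(selector):
--     tokens = []
--     i = 0
--     n = len(selector)
--     while i < n:
--         m = _MASTER.match(selector, i)
--         if m is None:
--             tokens.append(("ERROR", selector[i]))
--             return tokens
--         text = m.group()
--         if text[0] in "'\"":
--             s, i = _scan_string(selector, i)
--             if s is None:
--                 tokens.append(("ERROR", ""))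
--                 return tokens
--             tokens.append(("STRING", s))
--         elif text.isspace():
--             tokens.append(("WS", " "))
--             i = m.end()
--         elif text == "::":
--             tokens.append(("DOUBLE_COLON", "::"))
--             i = m.end()
--         elif len(text) == 1 and text in _PUNCT:
--             tokens.append((text, text))
--             i = m.end()
--         else:
--             tokens.append(("IDENT", text))
--             i = m.end()
--     return tokens
-- ===== Notes on version B (the rewrite author's own statement) =====
-- stated objective: idiomatic
-- what changed: Replaced the hand-rolled char-by-char dispatch loop with a regex-driven lexer: one compiled master pattern (ordered alternatives WS/::/punct/quote/ident) matched at a cursor position classifies and consumes each token, with quoted strings scanned by a separate escape-aware scanner.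
import Mathlib
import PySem

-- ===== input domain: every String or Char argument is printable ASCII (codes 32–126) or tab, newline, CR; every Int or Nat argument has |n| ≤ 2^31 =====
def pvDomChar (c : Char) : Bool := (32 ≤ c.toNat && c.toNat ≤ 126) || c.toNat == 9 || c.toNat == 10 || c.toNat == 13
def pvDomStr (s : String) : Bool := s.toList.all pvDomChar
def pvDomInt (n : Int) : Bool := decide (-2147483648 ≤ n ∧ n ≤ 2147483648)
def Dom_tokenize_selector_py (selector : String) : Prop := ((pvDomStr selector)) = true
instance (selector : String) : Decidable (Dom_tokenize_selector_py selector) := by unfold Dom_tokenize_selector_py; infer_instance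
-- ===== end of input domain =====

-- B re-implements A's hand-rolled char-by-char tokenizer as a regex-driven lexer (one master
-- pattern matched at a cursor); same return value, objective: idiomatic.

-- ===== PORT A =====
-- _is_ident_char
def pvIdentA (c : Char) : Bool := PySem.Chars.isalnum c || c = '-' || c = '_' || c = '*'

-- the tuple (":", ".", "#", ",", ">", "*", "[", "]", "=", "(", ")", "+") membership test
def pvPunctA (c : Char) : Bool :=
  c = ':' || c = '.' || c = '#' || c = ',' || c = '>' || c = '*' || c = '[' || c = ']' ||
  c = '=' || c = '(' || c = ')' || c = '+'

-- _parse_string: q = the opening quote s[start], acc = out, input list = the chars after start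
-- (the second component is the remaining suffix, i.e. the index j as a suffix of the string)
def pvParseStringA (q : Char) (acc : List Char) : List Char → Option (List Char) × List Char
  | [] => (none, [])
  | [c] => if c = q then (some acc, []) else (none, [])
  | c :: d :: rest =>
    if c = '\\' then pvParseStringA q (acc ++ [d]) rest
    else if c = q then (some acc, d :: rest)
    else pvParseStringA q (acc ++ [c]) (d :: rest)

-- the main while loop; the index i is the remaining suffix; fuel bounds the iteration count
-- (each iteration advances i by at least one, so length+1 fuel is never exhausted)
def pvTokA : Nat → List Char → List (String × String)
  | 0, _ => []
  | _, [] => []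
  | fuel+1, c :: rest =>
    if PySem.Chars.isspace c then
      ("WS", " ") :: pvTokA fuel ((c :: rest).dropWhile PySem.Chars.isspace)
    else if c = ':' ∧ rest.head? = some ':' then
      ("DOUBLE_COLON", "::") :: pvTokA fuel rest.tail
    else if pvPunctA c then
      (String.ofList [c], String.ofList [c]) :: pvTokA fuel rest
    else if c = '\'' ∨ c = '"' then
      match pvParseStringA c [] rest with
      | (none, _) => [("ERROR", "")]
      | (some s, rest') => ("STRING", String.ofList s) :: pvTokA fuel rest'
    else if pvIdentA c then
      ("IDENT", String.ofList (c :: rest.takeWhile pvIdentA)) :: pvTokA fuel (rest.dropWhile pvIdentA)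
    else [("ERROR", String.ofList [c])]

def tokenize_selector_py (selector : String) : List (String × String) :=
  pvTokA (selector.toList.length + 1) selector.toList

-- ===== PORT B =====
-- the char class [\w\-*] of the IDENT alternative (exact for the ASCII domain, where \w = isalnum or '_')
def pvWordB (c : Char) : Bool := PySem.Chars.isalnum c || c = '-' || c = '_' || c = '*'

-- the char class [:.#,>*\[\]=()+] of the punctuation alternative
def pvPunctB (c : Char) : Bool :=
  c = ':' || c = '.' || c = '#' || c = ',' || c = '>' || c = '*' || c = '[' || c = ']' ||
  c = '=' || c = '(' || c = ')' || c = '+'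

-- hand port of _MASTER.match(selector, i) (no regex engine in Lean): ordered alternation
-- \s+ | :: | [punct] | ['"] | [\w\-*]+ , each alternative greedy; returns the matched text.
-- Exact for this pattern on the ASCII domain.
def pvMasterMatch : List Char → Option (List Char)
  | [] => none
  | c :: rest =>
    if PySem.Chars.isspace c then some (c :: rest.takeWhile PySem.Chars.isspace)
    else if c = ':' ∧ rest.head? = some ':' then some [':', ':']
    else if pvPunctB c then some [c]
    else if c = '\'' ∨ c = '"' then some [c]
    else if pvWordB c then some (c :: rest.takeWhile pvWordB)
    else none

-- _scan_string: q = s[start], input list = the chars after start; second component = suffix after j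
def pvScanB (q : Char) (acc : List Char) : List Char → Option (List Char) × List Char
  | [] => (none, [])
  | c :: rest =>
    if c = q then (some acc, rest)
    else
      match rest with
      | [] => (none, [])
      | d :: rest' =>
        if c = '\\' then pvScanB q (acc ++ [d]) rest'
        else pvScanB q (acc ++ [c]) (d :: rest')

-- B's main while loop; fuel as in port A (each match consumes at least one char)
def pvTokB : Nat → List Char → List (String × String)
  | 0, _ => []
  | _, [] => []
  | fuel+1, c :: rest =>
    match pvMasterMatch (c :: rest) with
    | none => [("ERROR", String.ofList [c])]
    | some text =>
      if text.head? = some '\'' ∨ text.head? = some '"' then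
        match pvScanB c [] rest with
        | (none, _) => [("ERROR", "")]
        | (some s, rest') => ("STRING", String.ofList s) :: pvTokB fuel rest'
      else if PySem.Chars.strIsspace text then
        ("WS", " ") :: pvTokB fuel ((c :: rest).drop text.length)
      else if text = [':', ':'] then
        ("DOUBLE_COLON", "::") :: pvTokB fuel ((c :: rest).drop text.length)
      else if text.length = 1 ∧ pvPunctB (text.headD ' ') then
        (String.ofList text, String.ofList text) :: pvTokB fuel ((c :: rest).drop text.length)
      else
        ("IDENT", String.ofList text) :: pvTokB fuel ((c :: rest).drop text.length)

def tokenize_selector_py_alt (selector : String) : List (String × String) :=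
  pvTokB (selector.toList.length + 1) selector.toList

-- ===== PRECONDITION & SPEC =====
def Spec_tokenize_selector_py (selector : String) (out : List (String × String)) : Prop := out = tokenize_selector_py_alt selector
instance (selector : String) (out : List (String × String)) : Decidable (Spec_tokenize_selector_py selector out) := by unfold Spec_tokenize_selector_py; infer_instance

-- ===== CLAIM (what is proved, stated in full; the proofs are below) =====
def Claim_equal_tokenize_selector_py : Prop := ∀ (selector : String), Dom_tokenize_selector_py selector → Spec_tokenize_selector_py selector (tokenize_selector_py selector)

-- ===== LEMMAS AND PROOFS =====

-- A's _parse_string and B's _scan_string compute the same (result, remaining-suffix) pair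
lemma pv_parse_eq_scan (q : Char) (hq : q ≠ '\\') :
    ∀ cs acc, pvParseStringA q acc cs = pvScanB q acc cs := by
  intro cs acc
  induction acc, cs using pvParseStringA.induct (q := q) with
  | case1 acc => rfl
  | case2 acc => simp [pvParseStringA, pvScanB]
  | case3 acc c h => simp [pvParseStringA, pvScanB, h]
  | case4 acc d rest ih =>
    have h : ¬ ('\\' : Char) = q := fun h => hq h.symm
    simp [pvParseStringA, pvScanB, h, ih]
  | case5 acc d rest h => simp [pvParseStringA, pvScanB, h]
  | case6 acc c d rest h1 h2 ih => simp [pvParseStringA, pvScanB, h1, h2, ih]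

-- dropping the length of the greedy regex match = A's inner skip loop
lemma pv_drop_len_takeWhile {α : Type} (p : α → Bool) (l : List α) :
    l.drop (l.takeWhile p).length = l.dropWhile p := by
  induction l with
  | nil => rfl
  | cons a l ih =>
    by_cases h : p a = true
    · simp [h, ih]
    · simp [h]

-- the two main loops agree step by step (same fuel, same remaining suffix)
lemma pv_tok_eq : ∀ fuel cs, pvTokA fuel cs = pvTokB fuel cs := by
  intro fuel
  induction fuel with
  | zero => intro cs; rfl
  | succ fuel ih =>
    intro cs
    cases cs with
    | nil => rfl
    | cons c rest =>
      by_cases h1 : PySem.Chars.isspace c = true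
      · -- whitespace run
        have hq1 : ¬ c = '\'' := by rintro rfl; exact absurd h1 (by decide)
        have hq2 : ¬ c = '"' := by rintro rfl; exact absurd h1 (by decide)
        simp [pvTokA, pvTokB, pvMasterMatch, h1, hq1, hq2, PySem.Chars.strIsspace,
              List.all_takeWhile, ih, pv_drop_len_takeWhile]
      · by_cases h2 : c = ':' ∧ rest.head? = some ':'
        · -- "::"
          obtain ⟨rfl, hh⟩ := h2
          cases rest with
          | nil => simp at hh
          | cons d rest' =>
            simp at hh; subst hh
            simp [pvTokA, pvTokB, pvMasterMatch, h1, PySem.Chars.strIsspace, ih]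
        · by_cases h3 : pvPunctA c = true
          · -- single punctuation char
            have hq1 : ¬ c = '\'' := by
              rintro rfl; exact absurd h3 (by decide)
            have hq2 : ¬ c = '"' := by
              rintro rfl; exact absurd h3 (by decide)
            have hb : pvPunctB c = true := h3
            simp [pvTokA, pvTokB, pvMasterMatch, h1, h2, h3, hb, hq1, hq2,
                  PySem.Chars.strIsspace, ih]
          · by_cases h4 : c = '\'' ∨ c = '"'
            · -- quoted string
              rcases h4 with rfl | rfl
              · have hps := pv_parse_eq_scan '\'' (by decide) rest ([] : List Char)
                cases hp : pvScanB '\'' [] rest with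
                | mk o rest' =>
                  rw [hp] at hps
                  cases o with
                  | none =>
                    simp [pvTokA, pvTokB, pvMasterMatch, h1, h3, hp, hps]
                  | some s =>
                    simp [pvTokA, pvTokB, pvMasterMatch, h1, h3, hp, hps, ih]
              · have hps := pv_parse_eq_scan '"' (by decide) rest ([] : List Char)
                cases hp : pvScanB '"' [] rest with
                | mk o rest' =>
                  rw [hp] at hps
                  cases o with
                  | none =>
                    simp [pvTokA, pvTokB, pvMasterMatch, h1, h3, hp, hps]
                  | some s =>
                    simp [pvTokA, pvTokB, pvMasterMatch, h1, h3, hp, hps, ih]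
            · by_cases h5 : pvIdentA c = true
              · -- identifier run
                obtain ⟨hq1, hq2⟩ := not_or.mp h4
                have h3' : ¬ pvPunctB c = true := h3
                have hw : pvWordB c = true := h5
                have hcolon : ¬ c = ':' := by
                  rintro rfl; exact absurd h3 (by decide)
                have hne : ¬ (c :: rest.takeWhile pvWordB = [':', ':']) := by
                  intro h; injection h with h _; exact hcolon h
                have htwEq : rest.takeWhile pvIdentA = rest.takeWhile pvWordB := rfl
                have hdwEq : rest.dropWhile pvIdentA = rest.dropWhile pvWordB := rfl
                simp [pvTokA, pvTokB, pvMasterMatch, h1, h2, h3, h3', h5, hw, hne,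
                      hq1, hq2, PySem.Chars.strIsspace, htwEq, hdwEq, ih,
                      pv_drop_len_takeWhile]
              · -- unknown character: ERROR and stop
                obtain ⟨hq1, hq2⟩ := not_or.mp h4
                have h3' : ¬ pvPunctB c = true := h3
                have hw : ¬ pvWordB c = true := h5
                simp [pvTokA, pvTokB, pvMasterMatch, h1, h2, h3, h3', h5, hw, hq1, hq2]

-- ===== VERDICT (by name: the statement is the Claim_ definition above) =====
theorem tokenize_selector_py_spec : Claim_equal_tokenize_selector_py := by
  intro selector _
  unfold Spec_tokenize_selector_py tokenize_selector_py tokenize_selector_py_alt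
  exact pv_tok_eq _ _
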